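-- pv_equiv track=rewrite | github.com/zabaglione/c-language-tutorial | scripts/fix_printf_final.py | fix_printf_issues
-- ===== SOURCE A (Python) =====
-- def fix_printf_issues(content):
--     """Fix all printf formatting issues comprehensively"""
--     lines = content.split('\n')
--     fixed_lines = []
--     i = 0
--
--     while i < len(lines):
--         current_line = lines[i]
--
--         # Check if current line has printf ending with just )
--         # and next line is ");
--         if i + 1 < len(lines):
--             next_line = lines[i + 1]
--
--             # Pattern: printf("text\n")
--             #          ");
--             if ('printf(' in current_line and
--                 current_line.rstrip().endswith('")') and
--                 next_line.strip() == '");'):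
--                 # Fix by adding ; to current line and skip next line
--                 fixed_lines.append(current_line.rstrip() + ';')
--                 i += 2
--                 continue
--
--             # Pattern: printf("text\n")\n");
--             # This is another variant where the closing is split
--             if ('printf(' in current_line and
--                 current_line.rstrip().endswith('\\n")') and
--                 next_line.strip() == '");'):
--                 # Fix by adding ; to current line and skip next line
--                 fixed_lines.append(current_line.rstrip() + ';')
--                 i += 2
--                 continue
--
--             # Pattern: printf("text\n"
--             #          ");
--             if ('printf(' in current_line and
--                 not current_line.rstrip().endswith(';') and
--                 '\\n"' in current_line and
--                 next_line.strip() == '");'):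
--                 # Fix by merging the lines
--                 fixed_lines.append(current_line.rstrip() + ');')
--                 i += 2
--                 continue
--
--         fixed_lines.append(current_line)
--         i += 1
--
--     return '\n'.join(fixed_lines)
-- ===== SOURCE B (Python) =====
-- def fix_printf_issues(content):
--     """Fix all printf formatting issues comprehensively"""
--     fixed_lines = []
--     for line in content.split('\n'):
--         if line.strip() == '");' and fixed_lines:
--             last = fixed_lines[-1]
--             stripped = last.rstrip()
--             if 'printf(' in last and stripped.endswith('")'):
--                 fixed_lines[-1] = stripped + ';'
--                 continue
--             if ('printf(' in last and not stripped.endswith(';')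
--                     and '\\n"' in last):
--                 fixed_lines[-1] = stripped + ');'
--                 continue
--         fixed_lines.append(line)
--     return '\n'.join(fixed_lines)
-- ===== Notes on version B (the rewrite author's own statement) =====
-- stated objective: simpler
-- what changed: Replaces A's index-driven while loop with one-line lookahead and explicit skip-by-two of consumed lines by a single forward for-loop that appends every line and, on seeing a closing-only line, looks back and patches the last appended line in place (merged lines cannot re-match because they now end in a semicolon); A's dead second pattern, subsumed by its first, disappears.
import Mathlib
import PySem

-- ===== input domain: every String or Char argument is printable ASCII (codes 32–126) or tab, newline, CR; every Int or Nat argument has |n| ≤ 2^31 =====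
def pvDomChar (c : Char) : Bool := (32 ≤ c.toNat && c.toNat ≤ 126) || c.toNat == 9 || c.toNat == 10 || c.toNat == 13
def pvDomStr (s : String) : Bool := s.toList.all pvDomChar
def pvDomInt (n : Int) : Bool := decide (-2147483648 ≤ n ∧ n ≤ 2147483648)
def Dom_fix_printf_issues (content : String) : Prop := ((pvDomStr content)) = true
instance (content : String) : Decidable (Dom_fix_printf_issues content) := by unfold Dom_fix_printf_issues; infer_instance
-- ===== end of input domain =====

-- B replaces A's index-driven while loop with one-line lookahead (and explicit
-- skip of the consumed '");' line) by a single forward fold that appends every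
-- line and, on seeing a '");' line, patches the LAST appended line in place;
-- objective: simpler (no index arithmetic, no skip bookkeeping); same cost.

-- ===== PORT A =====
-- A's while loop over an index i, looking ahead at lines[i+1]; each arm of the
-- if-chain either consumes two lines (i += 2) or appends the current line (i += 1).
def fixA_go : List (List Char) → List (List Char)
  | [] => []
  | [c] => [c]
  | c :: n :: rest =>
      -- Pattern: printf("text\n")  /  ");
      if PySem.Chars.isIn "printf(".toList c = true ∧
         PySem.Chars.endswith (PySem.Chars.rstrip c) "\")".toList = true ∧
         PySem.Chars.strip n = "\");".toList then
        (PySem.Chars.rstrip c ++ ";".toList) :: fixA_go rest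
      -- Pattern: printf ending with literal \n")  /  ");
      else if PySem.Chars.isIn "printf(".toList c = true ∧
         PySem.Chars.endswith (PySem.Chars.rstrip c) "\\n\")".toList = true ∧
         PySem.Chars.strip n = "\");".toList then
        (PySem.Chars.rstrip c ++ ";".toList) :: fixA_go rest
      -- Pattern: printf("text\n"  /  ");
      else if PySem.Chars.isIn "printf(".toList c = true ∧
         ¬ PySem.Chars.endswith (PySem.Chars.rstrip c) ";".toList = true ∧
         PySem.Chars.isIn "\\n\"".toList c = true ∧
         PySem.Chars.strip n = "\");".toList then
        (PySem.Chars.rstrip c ++ ");".toList) :: fixA_go rest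
      else c :: fixA_go (n :: rest)

def fix_printf_issues (content : String) : String :=
  String.ofList (PySem.Chars.join "\n".toList
    (fixA_go (PySem.Chars.splitOn content.toList "\n".toList)))

-- ===== PORT B =====
-- B's loop body: append each line; on a '");' line, look back at the last
-- appended line and patch it instead (list kept reversed, head = last appended).
def fixB_step (acc : List (List Char)) (line : List Char) : List (List Char) :=
  if PySem.Chars.strip line = "\");".toList then
    match acc with
    | [] => line :: acc
    | last :: restAcc =>
        let stripped := PySem.Chars.rstrip last
        if PySem.Chars.isIn "printf(".toList last = true ∧
           PySem.Chars.endswith stripped "\")".toList = true then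
          (stripped ++ ";".toList) :: restAcc
        else if PySem.Chars.isIn "printf(".toList last = true ∧
           ¬ PySem.Chars.endswith stripped ";".toList = true ∧
           PySem.Chars.isIn "\\n\"".toList last = true then
          (stripped ++ ");".toList) :: restAcc
        else line :: last :: restAcc
  else line :: acc

def fix_printf_issues_alt (content : String) : String :=
  String.ofList (PySem.Chars.join "\n".toList
    (((PySem.Chars.splitOn content.toList "\n".toList).foldl fixB_step []).reverse))

-- ===== PRECONDITION & SPEC =====
def Spec_fix_printf_issues (content : String) (out : String) : Prop := out = fix_printf_issues_alt content
instance (content : String) (out : String) : Decidable (Spec_fix_printf_issues content out) := by unfold Spec_fix_printf_issues; infer_instance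

-- ===== CLAIM (what is proved, stated in full; the proofs are below) =====
def Claim_equal_fix_printf_issues : Prop := ∀ (content : String), Dom_fix_printf_issues content → Spec_fix_printf_issues content (fix_printf_issues content)

-- ===== LEMMAS AND PROOFS =====

-- a line ending in ';' (nonspace) is left unchanged by rstrip
lemma rstrip_append_nonspace (xs : List Char) (c : Char)
    (h : PySem.Chars.isspace c = false) :
    PySem.Chars.rstrip (xs ++ [c]) = xs ++ [c] := by
  simp [PySem.Chars.rstrip, h]

lemma not_endswith_quote_paren (xs : List Char) :
    ¬ PySem.Chars.endswith (xs ++ [';']) "\")".toList = true := by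
  rw [PySem.Chars.endswith_iff]
  rintro ⟨t, ht⟩
  have := congrArg List.getLast? ht
  simp at this

lemma endswith_semi (xs : List Char) :
    PySem.Chars.endswith (xs ++ [';']) ";".toList = true := by
  rw [PySem.Chars.endswith_iff]
  exact ⟨xs, rfl⟩

-- a merged line m = s ++ [';'] can never itself be a merge target
lemma fixA_go_inert (s : List Char) (rest : List (List Char)) :
    fixA_go ((s ++ [';']) :: rest) = (s ++ [';']) :: fixA_go rest := by
  cases rest with
  | nil => rfl
  | cons r rest' =>
    have h1 := not_endswith_quote_paren s
    have h2 := endswith_semi s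
    have h4 : ¬ PySem.Chars.endswith (s ++ [';']) "\\n\")".toList = true := by
      rw [PySem.Chars.endswith_iff]
      intro hsuf
      exact h1 ((PySem.Chars.endswith_iff _ _).2
        (List.IsSuffix.trans (by decide) hsuf))
    rw [fixA_go, rstrip_append_nonspace s ';' (by decide)]
    rw [if_neg (by tauto), if_neg (by tauto), if_neg (by tauto)]

-- main correspondence: once line c has been appended, B's future on the
-- remaining lines equals A's processing of c :: remaining lines
lemma fixB_main (lines : List (List Char)) :
    ∀ (c : List Char) (acc : List (List Char)),
    (List.foldl fixB_step (c :: acc) lines).reverse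
      = acc.reverse ++ fixA_go (c :: lines) := by
  induction lines with
  | nil => intro c acc; simp [fixA_go]
  | cons n rest ih =>
    intro c acc
    rw [List.foldl_cons]
    by_cases hs : PySem.Chars.strip n = "\");".toList
    · by_cases h1 : PySem.Chars.isIn "printf(".toList c = true ∧
          PySem.Chars.endswith (PySem.Chars.rstrip c) "\")".toList = true
      · -- merge branch 1
        have hstep : fixB_step (c :: acc) n
            = (PySem.Chars.rstrip c ++ ";".toList) :: acc := by
          simp only [fixB_step, if_pos hs, if_pos h1]
        rw [hstep]
        have hgo : fixA_go (c :: n :: rest)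
            = (PySem.Chars.rstrip c ++ ";".toList) :: fixA_go rest := by
          simp only [fixA_go]; rw [if_pos ⟨h1.1, h1.2, hs⟩]
        rw [hgo]
        cases rest with
        | nil => simp [fixA_go]
        | cons r rest' =>
          rw [ih _ acc]
          have : PySem.Chars.rstrip c ++ ";".toList
              = PySem.Chars.rstrip c ++ [';'] := rfl
          rw [this, fixA_go_inert]
      · by_cases h3 : PySem.Chars.isIn "printf(".toList c = true ∧
            ¬ PySem.Chars.endswith (PySem.Chars.rstrip c) ";".toList = true ∧
            PySem.Chars.isIn "\\n\"".toList c = true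
        · -- merge branch 3 (A's second arm is subsumed by its first)
          have hstep : fixB_step (c :: acc) n
              = (PySem.Chars.rstrip c ++ ");".toList) :: acc := by
            simp only [fixB_step, if_pos hs]
            rw [if_neg h1, if_pos h3]
          rw [hstep]
          have h2 : ¬ (PySem.Chars.isIn "printf(".toList c = true ∧
              PySem.Chars.endswith (PySem.Chars.rstrip c) "\\n\")".toList = true ∧
              PySem.Chars.strip n = "\");".toList) := by
            rintro ⟨ha, hb, -⟩
            exact h1 ⟨ha, (PySem.Chars.endswith_iff _ _).2
              (List.IsSuffix.trans (by decide)
                ((PySem.Chars.endswith_iff _ _).1 hb))⟩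
          have hgo : fixA_go (c :: n :: rest)
              = (PySem.Chars.rstrip c ++ ");".toList) :: fixA_go rest := by
            simp only [fixA_go]
            rw [if_neg (by tauto), if_neg h2, if_pos ⟨h3.1, h3.2.1, h3.2.2, hs⟩]
          rw [hgo]
          cases rest with
          | nil => simp [fixA_go]
          | cons r rest' =>
            rw [ih _ acc]
            have : PySem.Chars.rstrip c ++ ");".toList
                = (PySem.Chars.rstrip c ++ [')']) ++ [';'] := by simp
            rw [this, fixA_go_inert]
        · -- no merge: append n
          have hstep : fixB_step (c :: acc) n = n :: c :: acc := by
            simp only [fixB_step, if_pos hs]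
            rw [if_neg h1, if_neg h3]
          have h2 : ¬ (PySem.Chars.isIn "printf(".toList c = true ∧
              PySem.Chars.endswith (PySem.Chars.rstrip c) "\\n\")".toList = true ∧
              PySem.Chars.strip n = "\");".toList) := by
            rintro ⟨ha, hb, -⟩
            exact h1 ⟨ha, (PySem.Chars.endswith_iff _ _).2
              (List.IsSuffix.trans (by decide)
                ((PySem.Chars.endswith_iff _ _).1 hb))⟩
          have hgo : fixA_go (c :: n :: rest) = c :: fixA_go (n :: rest) := by
            simp only [fixA_go]
            rw [if_neg (by tauto), if_neg h2, if_neg (by tauto)]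
          rw [hstep, hgo, ih n (c :: acc)]
          simp
    · -- n is not a '");' line
      have hstep : fixB_step (c :: acc) n = n :: c :: acc := by
        simp only [fixB_step, if_neg hs]
      have hgo : fixA_go (c :: n :: rest) = c :: fixA_go (n :: rest) := by
        simp only [fixA_go]
        rw [if_neg (by tauto), if_neg (by tauto), if_neg (by tauto)]
      rw [hstep, hgo, ih n (c :: acc)]
      simp

lemma fixB_eq_fixA (ls : List (List Char)) :
    (List.foldl fixB_step [] ls).reverse = fixA_go ls := by
  cases ls with
  | nil => rfl
  | cons l rest =>
    have hstep : fixB_step [] l = [l] := by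
      simp only [fixB_step]
      split <;> rfl
    rw [List.foldl_cons, hstep]
    simpa using fixB_main rest l []

-- ===== VERDICT (by name: the statement is the Claim_ definition above) =====
theorem fix_printf_issues_spec : Claim_equal_fix_printf_issues := by
  intro content _
  unfold Spec_fix_printf_issues fix_printf_issues fix_printf_issues_alt
  rw [fixB_eq_fixA]
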